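-- pv_equiv track=rewrite | github.com/RafailTn/msc-thesis | src/intarna_fe.py | get_vector_indices_for_mirna_range
-- ===== SOURCE A (Python) =====
-- def get_mirna_position_map(total_vec):
--     """Returns mapping: vector_index -> miRNA_position (0-indexed within binding region)."""
--     position_map = {}
--     mirna_pos = 0
--     for vec_idx, char in enumerate(total_vec):
--         if char in '124Dd':
--             position_map[vec_idx] = mirna_pos
--             mirna_pos += 1
--         elif char in '3e':
--             position_map[vec_idx] = None
--         else:
--             position_map[vec_idx] = mirna_pos
--     return position_map
--
-- def get_vector_indices_for_mirna_range(total_vec, mirna_start, mirna_end, mirna_binding_start):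
--     """Get vector indices for a miRNA position range in the FULL miRNA."""
--     position_map = get_mirna_position_map(total_vec)
--     indices = []
--
--     for vec_idx, mirna_pos_in_binding in position_map.items():
--         if mirna_pos_in_binding is not None:
--             mirna_pos_in_full = mirna_pos_in_binding + mirna_binding_start
--             if mirna_start <= mirna_pos_in_full < mirna_end:
--                 indices.append(vec_idx)
--
--     return indices
-- ===== SOURCE B (Python) =====
-- def get_vector_indices_for_mirna_range(total_vec, mirna_start, mirna_end, mirna_binding_start):
--     """Single pass over total_vec; no intermediate position map."""
--     indices = []
--     mirna_pos = 0
--     for vec_idx, char in enumerate(total_vec):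
--         if char in '3e':
--             continue
--         if mirna_start <= mirna_pos + mirna_binding_start < mirna_end:
--             indices.append(vec_idx)
--         if char in '124Dd':
--             mirna_pos += 1
--     return indices
-- ===== Notes on version B (the rewrite author's own statement) =====
-- stated objective: simpler
-- what changed: Replaced the two-phase construction (build a full vector_index->position dict, then iterate its items) with a single pass over enumerate(total_vec) that tests the range inline while tracking a running miRNA position, so no position_map dict is ever built (constant-factor speedup from skipping dict construction).
import Mathlib
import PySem

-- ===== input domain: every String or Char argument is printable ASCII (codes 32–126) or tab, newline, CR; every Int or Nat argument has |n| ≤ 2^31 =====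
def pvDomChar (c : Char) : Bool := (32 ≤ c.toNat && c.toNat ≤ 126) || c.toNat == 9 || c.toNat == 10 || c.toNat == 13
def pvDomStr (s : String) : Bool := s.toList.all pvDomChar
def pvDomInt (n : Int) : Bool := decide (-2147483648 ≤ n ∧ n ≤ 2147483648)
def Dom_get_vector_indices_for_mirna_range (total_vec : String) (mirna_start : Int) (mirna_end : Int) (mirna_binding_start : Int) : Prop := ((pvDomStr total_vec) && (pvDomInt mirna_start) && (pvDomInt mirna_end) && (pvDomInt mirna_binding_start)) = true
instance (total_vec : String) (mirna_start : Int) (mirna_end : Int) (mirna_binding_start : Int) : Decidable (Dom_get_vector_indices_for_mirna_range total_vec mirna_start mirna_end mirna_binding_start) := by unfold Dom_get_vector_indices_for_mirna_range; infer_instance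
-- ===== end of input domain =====

-- B replaces A's build-a-position-map-then-scan-its-items with one inline pass over the
-- enumerated string (objective: simpler).


-- ===== PORT A =====
-- helper get_mirna_position_map: loop over enumerate(total_vec) building the dict and mirna_pos
def get_mirna_position_map (total_vec : String) : PySem.Dict Int (Option Int) :=
  ((PySem.List.enumerate total_vec.toList 0).foldl
    (fun (st : PySem.Dict Int (Option Int) × Int) p =>
      if p.2 ∈ ['1', '2', '4', 'D', 'd'] then
        (st.1.insert p.1 (some st.2), st.2 + 1)
      else if p.2 ∈ ['3', 'e'] then
        (st.1.insert p.1 none, st.2)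
      else
        (st.1.insert p.1 (some st.2), st.2))
    (PySem.Dict.empty, 0)).1

def get_vector_indices_for_mirna_range (total_vec : String) (mirna_start : Int) (mirna_end : Int) (mirna_binding_start : Int) : List Int :=
  (get_mirna_position_map total_vec).items.foldl
    (fun indices p =>
      match p.2 with
      | some mpos =>
          if mirna_start ≤ mpos + mirna_binding_start ∧ mpos + mirna_binding_start < mirna_end then
            indices ++ [p.1]
          else indices
      | none => indices)
    []

-- ===== PORT B =====
def get_vector_indices_for_mirna_range_alt (total_vec : String) (mirna_start : Int) (mirna_end : Int) (mirna_binding_start : Int) : List Int :=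
  (((PySem.List.enumerate total_vec.toList 0).foldl
    (fun (st : List Int × Int) p =>
      if p.2 ∈ ['3', 'e'] then st
      else
        ((if mirna_start ≤ st.2 + mirna_binding_start ∧ st.2 + mirna_binding_start < mirna_end then
            st.1 ++ [p.1]
          else st.1),
         if p.2 ∈ ['1', '2', '4', 'D', 'd'] then st.2 + 1 else st.2))
    ([], 0))).1

-- ===== PRECONDITION & SPEC =====
def Spec_get_vector_indices_for_mirna_range (total_vec : String) (mirna_start : Int) (mirna_end : Int) (mirna_binding_start : Int) (out : List Int) : Prop := out = get_vector_indices_for_mirna_range_alt total_vec mirna_start mirna_end mirna_binding_start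
instance (total_vec : String) (mirna_start : Int) (mirna_end : Int) (mirna_binding_start : Int) (out : List Int) : Decidable (Spec_get_vector_indices_for_mirna_range total_vec mirna_start mirna_end mirna_binding_start out) := by unfold Spec_get_vector_indices_for_mirna_range; infer_instance

-- ===== CLAIM (what is proved, stated in full; the proofs are below) =====
def Claim_equal_get_vector_indices_for_mirna_range : Prop := ∀ (total_vec : String) (mirna_start : Int) (mirna_end : Int) (mirna_binding_start : Int), Dom_get_vector_indices_for_mirna_range total_vec mirna_start mirna_end mirna_binding_start → Spec_get_vector_indices_for_mirna_range total_vec mirna_start mirna_end mirna_binding_start (get_vector_indices_for_mirna_range total_vec mirna_start mirna_end mirna_binding_start)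

-- ===== LEMMAS AND PROOFS =====

-- spec of A's position-map items in list form
def pvSpecItems (cs : List Char) (s : Int) (mp : Int) : List (Int × Option Int) :=
  match cs with
  | [] => []
  | c :: cs' =>
      if c ∈ ['1', '2', '4', 'D', 'd'] then (s, some mp) :: pvSpecItems cs' (s + 1) (mp + 1)
      else if c ∈ ['3', 'e'] then (s, none) :: pvSpecItems cs' (s + 1) mp
      else (s, some mp) :: pvSpecItems cs' (s + 1) mp

-- A's dict-building fold appends exactly pvSpecItems (all inserted keys are fresh)
theorem pvPosmapItems (cs : List Char) (s mp : Int) (pm : PySem.Dict Int (Option Int))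
    (hk : ∀ k, pm.contains k = true → k < s) :
    ((PySem.List.enumerate cs s).foldl
      (fun (st : PySem.Dict Int (Option Int) × Int) p =>
        if p.2 ∈ ['1', '2', '4', 'D', 'd'] then (st.1.insert p.1 (some st.2), st.2 + 1)
        else if p.2 ∈ ['3', 'e'] then (st.1.insert p.1 none, st.2)
        else (st.1.insert p.1 (some st.2), st.2)) (pm, mp)).1.items
    = pm.items ++ pvSpecItems cs s mp := by
  induction cs generalizing s mp pm with
  | nil => simp [PySem.List.enumerate, pvSpecItems]
  | cons c cs' ih =>
      have hfresh : pm.contains s = false := by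
        by_contra h
        have := hk s (by simpa using h)
        omega
      have hk' : ∀ (v : Option Int) (k : Int),
          (pm.insert s v).contains k = true → k < s + 1 := by
        intro v k hkk
        rw [PySem.Dict.contains_insert] at hkk
        rcases Bool.or_eq_true_iff.mp hkk with h | h
        · have : k = s := by simpa using h
          omega
        · have := hk k h; omega
      rw [PySem.List.enumerate_cons]
      simp only [List.foldl_cons, pvSpecItems]
      by_cases h1 : c ∈ ['1', '2', '4', 'D', 'd']
      · simp only [h1, if_pos]
        rw [ih (s + 1) (mp + 1) _ (hk' (some mp)),
            PySem.Dict.items_insert_of_not_contains _ _ hfresh]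
        simp
      · by_cases h2 : c ∈ ['3', 'e']
        · simp only [h1, h2, if_pos, if_false]
          rw [ih (s + 1) mp _ (hk' none),
              PySem.Dict.items_insert_of_not_contains _ _ hfresh]
          simp
        · simp only [h1, h2, if_false]
          rw [ih (s + 1) mp _ (hk' (some mp)),
              PySem.Dict.items_insert_of_not_contains _ _ hfresh]
          simp

-- B's single pass equals A's second loop run over pvSpecItems
theorem pvAltFold (mirna_start mirna_end mirna_binding_start : Int)
    (cs : List Char) (s mp : Int) (acc : List Int) :
    ((PySem.List.enumerate cs s).foldl
      (fun (st : List Int × Int) p =>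
        if p.2 ∈ ['3', 'e'] then st
        else
          ((if mirna_start ≤ st.2 + mirna_binding_start ∧ st.2 + mirna_binding_start < mirna_end then
              st.1 ++ [p.1]
            else st.1),
           if p.2 ∈ ['1', '2', '4', 'D', 'd'] then st.2 + 1 else st.2)) (acc, mp)).1
    = (pvSpecItems cs s mp).foldl
        (fun indices p =>
          match p.2 with
          | some mpos =>
              if mirna_start ≤ mpos + mirna_binding_start ∧ mpos + mirna_binding_start < mirna_end then
                indices ++ [p.1]
              else indices
          | none => indices) acc := by
  induction cs generalizing s mp acc with
  | nil => simp [PySem.List.enumerate, pvSpecItems]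
  | cons c cs' ih =>
      rw [PySem.List.enumerate_cons]
      simp only [List.foldl_cons, pvSpecItems]
      by_cases h1 : c ∈ ['1', '2', '4', 'D', 'd']
      · have h2 : c ∉ ['3', 'e'] := by
          simp only [List.mem_cons, List.not_mem_nil, or_false] at h1 ⊢
          rcases h1 with h | h | h | h | h <;> subst h <;> decide
        simp only [h1, h2, if_pos, if_false, List.foldl_cons]
        split_ifs with hc <;> exact ih (s + 1) (mp + 1) _
      · by_cases h2 : c ∈ ['3', 'e']
        · simp only [h1, h2, if_pos, if_false, List.foldl_cons]
          exact ih (s + 1) mp acc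
        · simp only [h1, h2, if_false, List.foldl_cons]
          split_ifs with hc <;> exact ih (s + 1) mp _

-- ===== VERDICT (by name: the statement is the Claim_ definition above) =====
theorem get_vector_indices_for_mirna_range_spec : Claim_equal_get_vector_indices_for_mirna_range := by
  intro total_vec mirna_start mirna_end mirna_binding_start _
  unfold Spec_get_vector_indices_for_mirna_range
  unfold get_vector_indices_for_mirna_range get_vector_indices_for_mirna_range_alt
  unfold get_mirna_position_map
  rw [pvPosmapItems total_vec.toList 0 0 PySem.Dict.empty (by simp [PySem.Dict.contains_empty]),
      pvAltFold]
  simp [PySem.Dict.empty]
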